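-- pv_equiv track=rewrite | github.com/NJOYs7/CU-ENGINEERING-Grader_Y1_2024 | 09/09_MoreDC_34.py | pattern2
-- ===== SOURCE A (Python) =====
-- def pattern2(nrows, ncols):
--     P2 = []
--     for i in range(1,nrows+1):
--         p2 = []
--         for j in range(ncols):
--             p2.append(i)
--             i += nrows
--         P2.append(p2)
--     return P2
-- ===== SOURCE B (Python) =====
-- def pattern2(nrows, ncols):
--     # Single pass over the flat column-major block 1..nrows*ncols:
--     # value v is dispatched to row (v - 1) % nrows; each row receives its
--     # values in increasing order, so no nested per-row loop is needed.
--     rows = [[] for _ in range(nrows)]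
--     if rows:
--         for v in range(1, nrows * ncols + 1):
--             rows[(v - 1) % nrows].append(v)
--     return rows
-- ===== Notes on version B (the rewrite author's own statement) =====
-- stated objective: alternative
-- what changed: B replaces A's nested row-by-row accumulation (mutating the loop variable i by nrows each step) with one linear pass over the flat block range(1, nrows*ncols+1) that dispatches each value v to row (v-1) % nrows by modular arithmetic.
import Mathlib
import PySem

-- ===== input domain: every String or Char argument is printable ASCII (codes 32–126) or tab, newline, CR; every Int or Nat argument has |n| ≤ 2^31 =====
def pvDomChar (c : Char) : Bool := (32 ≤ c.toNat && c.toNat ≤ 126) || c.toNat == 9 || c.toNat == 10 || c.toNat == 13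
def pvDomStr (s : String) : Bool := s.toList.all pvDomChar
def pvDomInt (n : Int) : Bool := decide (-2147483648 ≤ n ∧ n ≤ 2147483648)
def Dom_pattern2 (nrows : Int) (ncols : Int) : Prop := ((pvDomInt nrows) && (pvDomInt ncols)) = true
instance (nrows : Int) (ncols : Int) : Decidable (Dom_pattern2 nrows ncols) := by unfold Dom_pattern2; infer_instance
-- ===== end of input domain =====

-- B makes one linear pass over the flat block 1..nrows*ncols, dispatching each value v
-- to row (v-1) % nrows, instead of A's nested per-row accumulation loops.

-- ===== PORT A =====
-- literal transliteration of A: outer loop over range(1, nrows+1) appending rows;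
-- inner loop over range(ncols) carrying the pair (p2, i) and mutating i += nrows.
def pattern2 (nrows : Int) (ncols : Int) : List (List Int) :=
  (PySem.List.pyRange 1 (nrows + 1) 1).foldl
    (fun P2 i =>
      let st := (PySem.List.pyRange 0 ncols 1).foldl
        (fun (st : List Int × Int) _ => (st.1 ++ [st.2], st.2 + nrows)) ([], i)
      P2 ++ [st.1])
    []

-- ===== PORT B =====
-- literal transliteration of Source B: rows = [[] for _ in range(nrows)]; if rows:
-- for v in range(1, nrows*ncols+1): rows[(v-1) % nrows].append(v).
-- Inside the loop nrows > 0 (rows is nonempty), so the Python index (v-1) % nrows is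
-- nonnegative and in range: List.modify at its toNat is exact there.
def pattern2_alt (nrows : Int) (ncols : Int) : List (List Int) :=
  let rows := (PySem.List.pyRange 0 nrows 1).map (fun _ => ([] : List Int))
  if rows.isEmpty then rows
  else
    (PySem.List.pyRange 1 (nrows * ncols + 1) 1).foldl
      (fun rows v => rows.modify (PySem.Int.mod (v - 1) nrows).toNat (· ++ [v])) rows

-- ===== PRECONDITION & SPEC =====
def Spec_pattern2 (nrows : Int) (ncols : Int) (out : List (List Int)) : Prop := out = pattern2_alt nrows ncols
instance (nrows : Int) (ncols : Int) (out : List (List Int)) : Decidable (Spec_pattern2 nrows ncols out) := by unfold Spec_pattern2; infer_instance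

-- ===== CLAIM (what is proved, stated in full; the proofs are below) =====
def Claim_equal_pattern2 : Prop := ∀ (nrows : Int) (ncols : Int), Dom_pattern2 nrows ncols → Spec_pattern2 nrows ncols (pattern2 nrows ncols)

-- ===== LEMMAS AND PROOFS =====

-- A's inner loop: appending the running value and stepping it by d, over any list it ignores.
lemma innerLoop (d : Int) (l : List Int) (acc : List Int) (cur : Int) :
    l.foldl (fun (st : List Int × Int) _ => (st.1 ++ [st.2], st.2 + d)) (acc, cur)
      = (acc ++ (List.range l.length).map (fun (k : Nat) => cur + (k : Int) * d),
         cur + (l.length : Int) * d) := by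
  induction l generalizing acc cur with
  | nil => simp
  | cons x l ih =>
    simp only [List.foldl_cons, ih, List.length_cons, List.range_succ_eq_map,
      List.map_cons, List.map_map]
    refine Prod.ext ?_ ?_
    · simp only [List.append_assoc, List.singleton_append, Nat.cast_zero, zero_mul, add_zero]
      congr 1
      congr 1
      apply List.map_congr_left
      intro k _
      simp only [Function.comp_apply]
      push_cast
      ring
    · push_cast
      ring

-- A's result, in closed form.
lemma pattern2_eq_closed (nrows ncols : Int) :
    pattern2 nrows ncols
      = (List.range nrows.toNat).map (fun (r : Nat) =>
          (List.range ncols.toNat).map (fun (k : Nat) =>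
            (1 + (r : Int)) + (k : Int) * nrows)) := by
  unfold pattern2
  rw [PySem.List.foldl_append_singleton_eq_map]
  rw [PySem.List.pyRange_one 1 (nrows + 1), List.map_map]
  simp only [List.nil_append, add_sub_cancel_right]
  apply List.map_congr_left
  intro r _
  simp only [Function.comp_apply, innerLoop, List.nil_append,
    PySem.List.length_pyRange_one, sub_zero]

-- modify on a map-over-range list = pointwise update of the generating function
lemma modify_map_range (m s : Nat) (g : Nat → List Int) (f : List Int → List Int) :
    ((List.range m).map g).modify s f
      = (List.range m).map (fun r => if r = s then f (g s) else g r) := by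
  apply List.ext_getElem
  · simp
  · intro j h1 h2
    simp only [List.length_modify, List.length_map, List.length_range] at h1
    rw [List.getElem_modify]
    simp only [List.getElem_map, List.getElem_range]
    by_cases h : s = j
    · simp [h]
    · simp [h, Ne.symm h]

-- B's fold over one column block [m*c+1, m*c+m] appends value m*c+1+r to each row r.
lemma blockFold (nrows : Int) (hn : 0 < nrows) (c : Nat) :
    ∀ (n s : Nat), s + n ≤ nrows.toNat → ∀ (g : Nat → List Int),
    ((List.range' s n).map (fun (t : Nat) => (1 + ((nrows.toNat * c + t : Nat) : Int)))).foldl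
        (fun rows v => rows.modify (PySem.Int.mod (v - 1) nrows).toNat (· ++ [v]))
        ((List.range nrows.toNat).map g)
      = (List.range nrows.toNat).map (fun r =>
          if s ≤ r ∧ r < s + n then g r ++ [1 + ((nrows.toNat * c + r : Nat) : Int)] else g r) := by
  intro n
  induction n with
  | zero =>
    intro s _ g
    simp only [List.range'_zero, List.map_nil, List.foldl_nil]
    apply List.map_congr_left
    intro r _
    simp
  | succ n ih =>
    intro s hsn g
    rw [List.range'_succ, List.map_cons, List.foldl_cons]
    have hm : (nrows.toNat : Int) = nrows := Int.toNat_of_nonneg hn.le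
    have hidx : (PySem.Int.mod (1 + ((nrows.toNat * c + s : Nat) : Int) - 1) nrows).toNat = s := by
      rw [PySem.Int.mod_eq_emod_of_pos hn]
      have : (1 : Int) + ((nrows.toNat * c + s : Nat) : Int) - 1 = nrows * c + s := by
        push_cast [hm]; ring
      rw [this]
      have hs : (s : Int) < nrows := by omega
      have : (nrows * (c : Int) + (s : Int)) % nrows = (s : Int) := by
        rw [add_comm, Int.add_mul_emod_self_left]
        exact Int.emod_eq_of_lt (by positivity) hs
      rw [this]; omega
    rw [hidx, modify_map_range nrows.toNat s g _]
    rw [ih (s + 1) (by omega)]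
    apply List.map_congr_left
    intro r hr
    by_cases h : r = s
    · subst h
      rw [if_neg (show ¬(r + 1 ≤ r ∧ r < r + 1 + n) by omega), if_pos rfl,
        if_pos (show r ≤ r ∧ r < r + (n + 1) by omega)]
    · rw [if_neg h]
      by_cases h2 : s + 1 ≤ r ∧ r < s + 1 + n
      · rw [if_pos h2, if_pos (by omega)]
      · rw [if_neg h2, if_neg (by omega)]

-- B's full fold in closed form (one pass = columns processed in order).
lemma fullFold (nrows : Int) (hn : 0 < nrows) :
    ∀ (c : Nat),
    ((List.range (nrows.toNat * c)).map (fun (t : Nat) => (1 + (t : Int)))).foldl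
        (fun rows v => rows.modify (PySem.Int.mod (v - 1) nrows).toNat (· ++ [v]))
        ((List.range nrows.toNat).map (fun _ => ([] : List Int)))
      = (List.range nrows.toNat).map (fun (r : Nat) =>
          (List.range c).map (fun (k : Nat) => 1 + (r : Int) + (k : Int) * nrows)) := by
  intro c
  induction c with
  | zero => simp
  | succ c ih =>
    rw [show nrows.toNat * (c + 1) = nrows.toNat * c + nrows.toNat from by ring,
        List.range_add, List.map_append, List.foldl_append, ih, List.map_map]
    have hb := blockFold nrows hn c nrows.toNat 0 (by omega)
        (fun r => (List.range c).map (fun (k : Nat) => 1 + (r : Int) + (k : Int) * nrows))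
    rw [← List.range_eq_range'] at hb
    have hfun : ((fun (t : Nat) => (1 + (t : Int))) ∘ (fun x => nrows.toNat * c + x))
        = (fun (t : Nat) => (1 + ((nrows.toNat * c + t : Nat) : Int))) := by
      funext t; simp
    rw [hfun, hb]
    have hm : (nrows.toNat : Int) = nrows := Int.toNat_of_nonneg hn.le
    apply List.map_congr_left
    intro r hr
    rw [if_pos ⟨Nat.zero_le r, by simpa using List.mem_range.mp hr⟩]
    rw [List.range_succ, List.map_append, List.map_singleton]
    congr 1
    push_cast [hm]
    ring_nf

-- ===== VERDICT (by name: the statement is the Claim_ definition above) =====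
theorem pattern2_spec : Claim_equal_pattern2 := by
  intro nrows ncols _
  show pattern2 nrows ncols = pattern2_alt nrows ncols
  rw [pattern2_eq_closed]
  unfold pattern2_alt
  by_cases hn : nrows ≤ 0
  · rw [PySem.List.pyRange_one_eq_nil hn]
    simp [Int.toNat_of_nonpos hn]
  · replace hn : 0 < nrows := by omega
    have hm : (nrows.toNat : Int) = nrows := Int.toNat_of_nonneg hn.le
    have hrows : (PySem.List.pyRange 0 nrows 1).map (fun _ => ([] : List Int))
        = (List.range nrows.toNat).map (fun _ => ([] : List Int)) := by
      rw [PySem.List.pyRange_one 0 nrows, List.map_map, sub_zero]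
      rfl
    rw [hrows]
    have hne : ¬ ((List.range nrows.toNat).map (fun _ => ([] : List Int))).isEmpty = true := by
      simp
      omega
    rw [if_neg hne]
    by_cases hc : ncols ≤ 0
    · have : nrows * ncols + 1 ≤ 1 := by nlinarith
      rw [PySem.List.pyRange_one_eq_nil this, List.foldl_nil]
      apply List.map_congr_left
      intro r _
      simp [Int.toNat_of_nonpos hc]
    · replace hc : 0 < ncols := by omega
      have hcc : (ncols.toNat : Int) = ncols := Int.toNat_of_nonneg hc.le
      rw [PySem.List.pyRange_one 1 (nrows * ncols + 1)]
      have hprod : (nrows * ncols + 1 - 1).toNat = nrows.toNat * ncols.toNat := by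
        have h : nrows * ncols + 1 - 1 = ((nrows.toNat * ncols.toNat : Nat) : Int) := by
          push_cast [hm, hcc]; ring
        rw [h, Int.toNat_natCast]
      rw [hprod, fullFold nrows hn ncols.toNat]
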